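-- pv_equiv track=rewrite | github.com/ISHANKSHARMA146/JobApplicationAutomation | src/ai/ocr_module.py | _guess_field_type
-- ===== SOURCE A (Python) =====
-- def _guess_field_type(label_text: str) -> str:
--     """
--     Guess the type of form field based on its label text.
--
--     Args:
--         label_text: The label text of the form field
--
--     Returns:
--         str: Probable type of the form field
--     """
--     label_text = label_text.lower()
--
--     if any(keyword in label_text for keyword in ['email']):
--         return 'email'
--
--     elif any(keyword in label_text for keyword in ['password', 'pwd']):
--         return 'password'
--
--     elif any(keyword in label_text for keyword in ['phone', 'mobile', 'cell']):
--         return 'phone'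
--
--     elif any(keyword in label_text for keyword in ['date', 'birth', 'dob']):
--         return 'date'
--
--     elif any(keyword in label_text for keyword in ['select', 'choose', 'option']):
--         return 'select'
--
--     elif any(keyword in label_text for keyword in ['upload', 'file', 'resume', 'cv']):
--         return 'file'
--
--     elif any(keyword in label_text for keyword in ['check', 'agree', 'accept', 'terms']):
--         return 'checkbox'
--
--     # Default to text for most fields
--     return 'text'
-- ===== SOURCE B (Python) =====
-- TYPE_KEYWORDS = {
--     'checkbox': ['check', 'agree', 'accept', 'terms'],
--     'date': ['date', 'birth', 'dob'],
--     'email': ['email'],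
--     'file': ['upload', 'file', 'resume', 'cv'],
--     'password': ['password', 'pwd'],
--     'phone': ['phone', 'mobile', 'cell'],
--     'select': ['select', 'choose', 'option'],
-- }
--
-- PRIORITY = {'email': 0, 'password': 1, 'phone': 2, 'date': 3,
--             'select': 4, 'file': 5, 'checkbox': 6}
--
-- def _guess_field_type(label_text: str) -> str:
--     lt = label_text.lower()
--     matched = [t for t, kws in TYPE_KEYWORDS.items()
--                if any(kw in lt for kw in kws)]
--     return min(matched, key=PRIORITY.__getitem__, default='text')
-- ===== Notes on version B (the rewrite author's own statement) =====
-- stated objective: alternative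
-- what changed: Instead of a priority-ordered if/elif chain with early exit, B evaluates every rule (stored alphabetically), collects all matching field types, and returns the one of minimum priority rank via min with a key function, falling back to the default type when nothing matches.
import Mathlib
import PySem

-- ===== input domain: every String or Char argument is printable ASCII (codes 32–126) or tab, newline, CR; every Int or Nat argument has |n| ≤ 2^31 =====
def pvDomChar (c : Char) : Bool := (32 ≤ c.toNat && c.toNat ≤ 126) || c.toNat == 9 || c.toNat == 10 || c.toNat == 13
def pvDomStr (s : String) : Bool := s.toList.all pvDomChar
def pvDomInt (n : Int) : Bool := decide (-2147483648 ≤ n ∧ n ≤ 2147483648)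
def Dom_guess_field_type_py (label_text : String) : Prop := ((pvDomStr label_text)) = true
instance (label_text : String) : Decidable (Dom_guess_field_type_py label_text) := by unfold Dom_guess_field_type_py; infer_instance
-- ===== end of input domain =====

-- B replaces A's priority-ordered early-exit if/elif chain by collecting ALL matching
-- field types (rules listed alphabetically) and selecting the one of minimum priority
-- rank (simpler selection-by-min, same cost).

-- ===== PORT A =====
def guess_field_type_py (label_text : String) : String :=
  let lt := PySem.Str.lower label_text
  if ["email"].any (fun kw => PySem.Str.isIn kw lt) then "email"
  else if ["password", "pwd"].any (fun kw => PySem.Str.isIn kw lt) then "password"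
  else if ["phone", "mobile", "cell"].any (fun kw => PySem.Str.isIn kw lt) then "phone"
  else if ["date", "birth", "dob"].any (fun kw => PySem.Str.isIn kw lt) then "date"
  else if ["select", "choose", "option"].any (fun kw => PySem.Str.isIn kw lt) then "select"
  else if ["upload", "file", "resume", "cv"].any (fun kw => PySem.Str.isIn kw lt) then "file"
  else if ["check", "agree", "accept", "terms"].any (fun kw => PySem.Str.isIn kw lt) then "checkbox"
  else "text"

-- ===== PORT B =====
-- TYPE_KEYWORDS (alphabetical by field type) and PRIORITY from Source B
def pvTypeKeywords : List (String × List String) :=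
  [("checkbox", ["check", "agree", "accept", "terms"]),
   ("date", ["date", "birth", "dob"]),
   ("email", ["email"]),
   ("file", ["upload", "file", "resume", "cv"]),
   ("password", ["password", "pwd"]),
   ("phone", ["phone", "mobile", "cell"]),
   ("select", ["select", "choose", "option"])]

def pvPriority : List (String × Int) :=
  [("email", 0), ("password", 1), ("phone", 2), ("date", 3),
   ("select", 4), ("file", 5), ("checkbox", 6)]

-- PRIORITY.__getitem__; every key produced by the comprehension is present in PRIORITY,
-- so the getD default is never reached.
def pvPrio (t : String) : Int := (pvPriority.lookup t).getD 0

def guess_field_type_py_alt (label_text : String) : String :=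
  let lt := PySem.Str.lower label_text
  let matched := pvTypeKeywords.filterMap
    (fun r => if r.2.any (fun kw => PySem.Str.isIn kw lt) then some r.1 else none)
  PySem.List.minD matched pvPrio "text"

-- ===== PRECONDITION & SPEC =====
def Spec_guess_field_type_py (label_text : String) (out : String) : Prop := out = guess_field_type_py_alt label_text
instance (label_text : String) (out : String) : Decidable (Spec_guess_field_type_py label_text out) := by unfold Spec_guess_field_type_py; infer_instance

-- ===== CLAIM (what is proved, stated in full; the proofs are below) =====
def Claim_equal_guess_field_type_py : Prop := ∀ (label_text : String), Dom_guess_field_type_py label_text → Spec_guess_field_type_py label_text (guess_field_type_py label_text)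

-- ===== LEMMAS AND PROOFS =====
-- Both programs depend on the input only through the seven boolean group tests
-- 'any keyword of the group occurs in the lowered label'; generalize those seven
-- booleans and check all 128 combinations by kernel evaluation.

-- ===== VERDICT (by name: the statement is the Claim_ definition above) =====
theorem guess_field_type_py_spec : Claim_equal_guess_field_type_py := by
  intro label_text _
  unfold Spec_guess_field_type_py guess_field_type_py guess_field_type_py_alt pvTypeKeywords
  simp only [List.filterMap_cons, List.filterMap_nil]
  generalize (["email"].any (fun kw => PySem.Str.isIn kw (PySem.Str.lower label_text))) = b1
  generalize (["password", "pwd"].any (fun kw => PySem.Str.isIn kw (PySem.Str.lower label_text))) = b2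
  generalize (["phone", "mobile", "cell"].any (fun kw => PySem.Str.isIn kw (PySem.Str.lower label_text))) = b3
  generalize (["date", "birth", "dob"].any (fun kw => PySem.Str.isIn kw (PySem.Str.lower label_text))) = b4
  generalize (["select", "choose", "option"].any (fun kw => PySem.Str.isIn kw (PySem.Str.lower label_text))) = b5
  generalize (["upload", "file", "resume", "cv"].any (fun kw => PySem.Str.isIn kw (PySem.Str.lower label_text))) = b6
  generalize (["check", "agree", "accept", "terms"].any (fun kw => PySem.Str.isIn kw (PySem.Str.lower label_text))) = b7
  revert b1 b2 b3 b4 b5 b6 b7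
  decide
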